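-- pv_equiv track=rewrite | github.com/violetassom/Baekjoon | 프로그래머스/2/72411. 메뉴 리뉴얼/메뉴 리뉴얼.py | solution
-- ===== SOURCE A (Python) =====
-- import itertools
--
-- def solution(orders, course):
--     # comb_dict = {}
--     # for i orders
--         # for j course
--             # comb_dict
--     # sorted
--     answer=[]
--     comb_dict = {}
--     for j in course:
--         for i in orders:
--             i = sorted(list(i))
--             comb_result = itertools.combinations(i,j)
--             for k in comb_result:
--                 if k not in comb_dict:
--                     comb_dict[k]=1
--                 else:
--                     comb_dict[k]+=1
--     for j in course:
--         temp_comb_dict = {''.join(key):val for key,val in comb_dict.items() if len(key)==j}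
--         if len(temp_comb_dict)!=0:
--             max_dict = max(temp_comb_dict.values())
--             if max_dict>1:
--                 temp_comb_dict = {key:val for key,val in temp_comb_dict.items() if val==max_dict}
--                 result = sorted(temp_comb_dict,key=lambda x: temp_comb_dict[x],reverse=True)
--                 answer.extend(result)
--
--     answer.sort()
--     return answer
-- ===== SOURCE B (Python) =====
-- import itertools
--
-- def ways(s, t):
--     # number of times t occurs as a subsequence of s (DP over s right-to-left)
--     n = len(t)
--     e = [0] * n + [1]
--     for ch in reversed(s):
--         e = [e[i] + (e[i + 1] if t[i] == ch else 0) for i in range(n)] + [1]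
--     return e[0]
--
-- def solution(orders, course):
--     # Combinations are enumerated only to discover candidate menus (deduped in
--     # first-appearance order); each candidate's frequency is then computed by a
--     # subsequence-counting DP over every order -- no tally dict at all.
--     answer = []
--     sorted_orders = [''.join(sorted(o)) for o in orders]
--     for j in course:
--         cands = list(dict.fromkeys(
--             ''.join(c) for o in sorted_orders for c in itertools.combinations(o, j)))
--         if cands:
--             counts = [sum(ways(o, s) for o in sorted_orders) for s in cands]
--             best = max(counts)
--             if best > 1:
--                 answer.extend(s for s, v in zip(cands, counts) if v == best)
--     answer.sort()
--     return answer
-- ===== Notes on version B (the rewrite author's own statement) =====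
-- stated objective: alternative
-- what changed: B keeps no tally at all: it enumerates combinations only to discover the candidate menus of each size (deduped in first-appearance order) and then computes each candidate's frequency with a subsequence-counting DP run over every order, whereas A counts every enumerated combination in one global mixed-size dict and filters it by key length afterwards.
-- outside the precondition, e.g. on solution(['ab'], [1, 1]): A returns ['a', 'a', 'b', 'b'], B returns []
import Mathlib
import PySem

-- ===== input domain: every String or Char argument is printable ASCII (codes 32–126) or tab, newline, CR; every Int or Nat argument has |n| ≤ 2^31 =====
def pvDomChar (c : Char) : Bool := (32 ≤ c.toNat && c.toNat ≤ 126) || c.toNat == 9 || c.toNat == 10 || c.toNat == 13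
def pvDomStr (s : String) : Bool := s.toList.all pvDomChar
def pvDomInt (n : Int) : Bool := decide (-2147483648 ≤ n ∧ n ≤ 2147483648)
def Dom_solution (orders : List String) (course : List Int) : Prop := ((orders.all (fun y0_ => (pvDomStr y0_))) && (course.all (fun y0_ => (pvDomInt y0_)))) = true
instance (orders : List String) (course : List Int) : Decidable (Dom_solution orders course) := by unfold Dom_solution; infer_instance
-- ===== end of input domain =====

-- B enumerates combinations only to discover candidate menus and computes each candidate's
-- frequency by a subsequence-counting DP over every order; A tallies every enumerated
-- combination in one global mixed-size dict (alternative algorithm; similar cost).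


-- ===== PORT A =====
def solution (orders : List String) (course : List Int) : List String :=
  let comb_dict : PySem.Dict (List Char) Int :=
    course.foldl (fun d j =>
      orders.foldl (fun d i =>
        let i' := PySem.List.sorted i.toList (fun c => c) false
        let comb_result := PySem.List.combinations i' j.toNat
        comb_result.foldl (fun d k =>
          if d.contains k = false then d.insert k 1
          else d.insert k (d.getD k 0 + 1)) d) d) PySem.Dict.empty
  let answer : List String :=
    course.foldl (fun answer j =>
      let temp : PySem.Dict String Int :=
        (comb_dict.items.filter (fun kv => ((kv.1.length : Int) == j))).foldl
          (fun t kv => t.insert (String.ofList kv.1) kv.2) PySem.Dict.empty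
      if temp.size ≠ 0 then
        match PySem.List.max? temp.values (fun v => v) with
        | none => answer
        | some max_dict =>
          if max_dict > 1 then
            let temp2 : PySem.Dict String Int :=
              (temp.items.filter (fun kv => kv.2 == max_dict)).foldl
                (fun t kv => t.insert kv.1 kv.2) PySem.Dict.empty
            let result := PySem.List.sorted temp2.keys (fun x => temp2.getD x 0) true
            answer ++ result
          else answer
      else answer) []
  PySem.List.sorted answer (fun x => x) false

-- ===== PORT B =====
-- ways(s, t): number of occurrences of t as a subsequence of s, by DP over s right to left
-- (list indices i, i+1 are always in range, so getD is exact there)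
def waysCore (s t : List Char) : Int :=
  let n := t.length
  let e0 : List Int := List.replicate n 0 ++ [1]
  let e := s.reverse.foldl (fun e ch =>
    ((List.range n).map (fun i =>
      e.getD i 0 + if t.getD i ' ' == ch then e.getD (i+1) 0 else 0)) ++ [1]) e0
  e.getD 0 0

def ways (s t : String) : Int := waysCore s.toList t.toList

def solution_alt (orders : List String) (course : List Int) : List String :=
  let sorted_orders := orders.map (fun o => String.ofList (PySem.List.sorted o.toList (fun c => c) false))
  let answer : List String :=
    course.foldl (fun answer j =>
      let cands := PySem.List.dedup (sorted_orders.flatMap (fun o =>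
        (PySem.List.combinations o.toList j.toNat).map (fun c => String.ofList c)))
      if cands ≠ [] then
        let counts := cands.map (fun s => (sorted_orders.map (fun o => ways o s)).sum)
        match PySem.List.max? counts (fun v => v) with
        | none => answer
        | some best =>
          if best > 1 then
            answer ++ ((cands.zip counts).filter (fun kv => kv.2 == best)).map (fun kv => kv.1)
          else answer
      else answer) []
  PySem.List.sorted answer (fun x => x) false

-- ===== PRECONDITION & SPEC =====
-- Pre_ excludes course lists with a repeated size — the Programmers task guarantees distinct
-- course sizes; on a repeated size A's global dict tallies every combination once per occurrence,
-- so A's 'ordered more than once' threshold counts duplicate sizes while B's per-size tally does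
-- not (they often still agree; the disagreeing subset depends on the tallied counts and has no
-- closed form) — and negative course entries, on which both Pythons raise ValueError.
def Pre_solution (orders : List String) (course : List Int) : Prop :=
  course.Nodup ∧ ∀ j ∈ course, 0 ≤ j
instance (orders : List String) (course : List Int) : Decidable (Pre_solution orders course) := by
  unfold Pre_solution; infer_instance
def pvWitness_solution : List String × List Int :=
  (["ABCFG", "AC", "CDE", "ACDE", "BCFG", "ACDEH"], [2, 3, 4])

def Spec_solution (orders : List String) (course : List Int) (out : List String) : Prop := out = solution_alt orders course
instance (orders : List String) (course : List Int) (out : List String) : Decidable (Spec_solution orders course out) := by unfold Spec_solution; infer_instance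

-- ===== CLAIM (what is proved, stated in full; the proofs are below) =====
def Claim_equal_solution : Prop := ∀ (orders : List String) (course : List Int), Dom_solution orders course → Pre_solution orders course → Spec_solution orders course (solution orders course)


-- ===== LEMMAS AND PROOFS =====

-- sorted(list(i)) as a List Char
def pvSortedChars (i : String) : List Char :=
  PySem.List.sorted i.toList (fun c => c) false

-- the stream of size-j combination keys, in A's and B's shared traversal order
def pvK (orders : List String) (j : Int) : List (List Char) :=
  orders.flatMap (fun i => PySem.List.combinations (pvSortedChars i) j.toNat)

-- the mathematical subsequence-occurrence count B's DP computes
def pvWaysR : List Char → List Char → Int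
  | _, [] => 1
  | [], _ :: _ => 0
  | x :: s, y :: t => pvWaysR s (y :: t) + (if x == y then pvWaysR s t else 0)

theorem pv_foldl_flatMap {α β γ : Type} (l : List α) (f : α → List β) (g : γ → β → γ)
    (init : γ) :
    (l.flatMap f).foldl g init = l.foldl (fun acc x => (f x).foldl g acc) init := by
  induction l generalizing init with
  | nil => rfl
  | cons x xs ih => simp [List.flatMap_cons, List.foldl_append, ih]

-- A's first double loop builds Counter(course.flatMap pvK)
theorem pv_combdict (orders : List String) (course : List Int) :
    course.foldl (fun d j =>
      orders.foldl (fun d i =>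
        (PySem.List.combinations (pvSortedChars i) j.toNat).foldl (fun d k =>
          if d.contains k = false then d.insert k 1
          else d.insert k (d.getD k 0 + 1)) d) d) PySem.Dict.empty
      = PySem.Dict.counter (course.flatMap (pvK orders)) := by
  have hstep : ∀ (d : PySem.Dict (List Char) Int) (k : List Char),
      (if d.contains k = false then d.insert k 1 else d.insert k (d.getD k 0 + 1))
        = d.insert k (d.getD k 0 + 1) := by
    intro d k
    cases h : d.contains k with
    | false => simp [PySem.Dict.getD_of_not_contains _ _ h]
    | true => simp
  rw [← PySem.Dict.foldl_insert_getD_add_one_eq_counter, pv_foldl_flatMap]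
  simp only [pvK, pv_foldl_flatMap, hstep]

theorem pv_len_mem_K (orders : List String) (j : Int) (x : List Char)
    (hx : x ∈ pvK orders j) : x.length = j.toNat := by
  rcases List.mem_flatMap.1 hx with ⟨i, _, hxi⟩
  exact PySem.List.length_of_mem_combinations hxi

theorem pv_filter_flatMap (orders : List String) (course : List Int) (j : Int)
    (hnd : course.Nodup) (hpos : ∀ a ∈ course, 0 ≤ a) (hj : j ∈ course) :
    (course.flatMap (pvK orders)).filter (fun k => ((k.length : Int) == j))
      = pvK orders j := by
  induction course with
  | nil => cases hj
  | cons c cs ih =>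
    have hc : 0 ≤ c := hpos c (List.mem_cons_self ..)
    have hcs : ∀ a ∈ cs, 0 ≤ a := fun a ha => hpos a (List.mem_cons_of_mem _ ha)
    have hnotin : c ∉ cs := (List.nodup_cons.1 hnd).1
    have hblock : ∀ (j' : Int), 0 ≤ j' → j' ≠ j →
        (pvK orders j').filter (fun k => ((k.length : Int) == j)) = [] := by
      intro j' h0 hne
      rw [List.filter_eq_nil_iff]
      intro k hk
      have hlen := pv_len_mem_K orders j' k hk
      have hjj : j ∈ (c :: cs) := hj
      have h0j : 0 ≤ j := hpos j hjj
      simp only [beq_iff_eq, hlen]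
      intro habs
      exact hne (by omega)
    rw [List.flatMap_cons, List.filter_append]
    rcases List.mem_cons.1 hj with hjc | hjcs
    · subst hjc
      have h1 : (pvK orders j).filter (fun k => ((k.length : Int) == j)) = pvK orders j := by
        rw [List.filter_eq_self]
        intro k hk
        have := pv_len_mem_K orders j k hk
        simp only [this, beq_iff_eq]
        omega
      have h2 : (cs.flatMap (pvK orders)).filter (fun k => ((k.length : Int) == j)) = [] := by
        rw [List.filter_eq_nil_iff]
        intro k hk
        rcases List.mem_flatMap.1 hk with ⟨j', hj', hkj'⟩
        have hne : j' ≠ j := fun h => hnotin (h ▸ hj')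
        have := List.filter_eq_nil_iff.1 (hblock j' (hcs j' hj') hne) k hkj'
        exact this
      rw [h1, h2, List.append_nil]
    · have hne : c ≠ j := fun h => hnotin (h ▸ hjcs)
      rw [hblock c hc hne, List.nil_append]
      exact ih (List.nodup_cons.1 hnd).2 hcs hjcs

theorem pv_filter_update {α : Type} [BEq α] [LawfulBEq α] (p : α → Bool) (S : List α) :
    ∀ (s : List α), (PySem.Set.update s S).filter p = PySem.Set.update (s.filter p) (S.filter p) := by
  induction S with
  | nil => intro s; rfl
  | cons x S' ih =>
    intro s
    have hadd : (PySem.Set.add s x).filter p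
        = if p x then PySem.Set.add (s.filter p) x else s.filter p := by
      by_cases hx : x ∈ s
      · by_cases hp : p x = true
        · have hxf' : x ∈ s.filter p := List.mem_filter.2 ⟨hx, hp⟩
          simp [PySem.Set.add, PySem.Set.contains, hx, hp, hxf']
        · simp [PySem.Set.add, PySem.Set.contains, hx, hp]
      · have hxf : x ∉ s.filter p := fun h => hx (List.mem_filter.1 h).1
        by_cases hp : p x = true
        · simp [PySem.Set.add, PySem.Set.contains, hx, hp, hxf, List.filter_append]
        · simp [PySem.Set.add, PySem.Set.contains, hx, hp, List.filter_append]
    show (PySem.Set.update (PySem.Set.add s x) S').filter p = _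
    rw [ih, hadd]
    by_cases hp : p x = true
    · simp only [List.filter_cons, hp]
      rfl
    · simp only [List.filter_cons, hp]
      simp

theorem pv_filter_ofList {α : Type} [BEq α] [LawfulBEq α] (p : α → Bool) (S : List α) :
    (PySem.Set.ofList S).filter p = PySem.Set.ofList (S.filter p) := by
  have := pv_filter_update p S []
  simpa [PySem.Set.ofList, PySem.Set.update, PySem.Set.empty] using this

theorem pv_ofList_map {α β : Type} [BEq α] [LawfulBEq α] [BEq β] [LawfulBEq β]
    (f : α → β) (hf : Function.Injective f) (S : List α) :
    ∀ (s : List α), PySem.Set.update (s.map f) (S.map f) = (PySem.Set.update s S).map f := by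
  induction S with
  | nil => intro s; rfl
  | cons x S' ih =>
    intro s
    have hadd : PySem.Set.add (s.map f) (f x) = (PySem.Set.add s x).map f := by
      have hiff : (f x ∈ s.map f) ↔ (x ∈ s) := by
        constructor
        · intro h
          rcases List.mem_map.1 h with ⟨a, ha, hfa⟩
          exact (hf hfa) ▸ ha
        · intro h
          exact List.mem_map.2 ⟨x, h, rfl⟩
      by_cases hx : x ∈ s
      · simp [PySem.Set.add, PySem.Set.contains, hx, hiff.2 hx]
      · have hnx : f x ∉ s.map f := fun h => hx (hiff.1 h)
        simp [PySem.Set.add, PySem.Set.contains, hx, hnx]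
    show PySem.Set.update (PySem.Set.add (s.map f) (f x)) (S'.map f) = _
    rw [hadd, ih]
    rfl

theorem pv_ofList_map' {α β : Type} [BEq α] [LawfulBEq α] [BEq β] [LawfulBEq β]
    (f : α → β) (hf : Function.Injective f) (S : List α) :
    PySem.Set.ofList (S.map f) = (PySem.Set.ofList S).map f := by
  have := pv_ofList_map f hf S []
  simpa [PySem.Set.ofList, PySem.Set.update] using this

theorem pv_ofList_injective : Function.Injective String.ofList := by
  intro a b h
  have := congrArg String.toList h
  simpa using this

theorem pv_count_block (orders : List String) (course : List Int) (j : Int)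
    (hnd : course.Nodup) (hpos : ∀ a ∈ course, 0 ≤ a) (hj : j ∈ course)
    (k : List Char) (hk : k ∈ pvK orders j) :
    (course.flatMap (pvK orders)).count k = (pvK orders j).count k := by
  have hq : ((k.length : Int) == j) = true := by
    have := pv_len_mem_K orders j k hk
    have h0 : 0 ≤ j := hpos j hj
    simp only [this, beq_iff_eq]
    omega
  rw [← pv_filter_flatMap orders course j hnd hpos hj,
    List.count_filter (p := fun x => ((x.length : Int) == j)) (a := k) hq]

theorem pv_temp_eq_cnt (orders : List String) (course : List Int) (j : Int)
    (hnd : course.Nodup) (hpos : ∀ a ∈ course, 0 ≤ a) (hj : j ∈ course) :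
    ((PySem.Dict.counter (course.flatMap (pvK orders))).items.filter
        (fun kv => ((kv.1.length : Int) == j))).foldl
      (fun t kv => t.insert (String.ofList kv.1) kv.2) PySem.Dict.empty
    = PySem.Dict.counter ((pvK orders j).map String.ofList) := by
  have hfilter : (PySem.Dict.counter (course.flatMap (pvK orders))).items.filter
        (fun kv => ((kv.1.length : Int) == j))
      = (PySem.Set.ofList (pvK orders j)).map
          (fun k => (k, ((pvK orders j).count k : Int))) := by
    rw [PySem.Dict.items_counter, List.filter_map]
    have hcomp : ((fun (kv : List Char × Int) => ((kv.1.length : Int) == j)) ∘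
        (fun k => (k, ((course.flatMap (pvK orders)).count k : Int))))
        = (fun k => ((k.length : Int) == j)) := rfl
    rw [hcomp, pv_filter_ofList, pv_filter_flatMap orders course j hnd hpos hj]
    refine List.map_congr_left ?_
    intro k hk
    have hk' : k ∈ pvK orders j := (PySem.Set.mem_ofList _ _).1 hk
    rw [pv_count_block orders course j hnd hpos hj k hk']
  rw [hfilter]
  set L := (PySem.Set.ofList (pvK orders j)).map
    (fun k => (k, ((pvK orders j).count k : Int))) with hL
  have hnodupL : (L.map (fun kv => String.ofList kv.1)).Nodup := by
    have h1 : L.map (fun kv => String.ofList kv.1)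
        = (PySem.Set.ofList (pvK orders j)).map String.ofList := by
      rw [hL, List.map_map]; rfl
    rw [h1]
    exact (PySem.Set.nodup_ofList _).map pv_ofList_injective
  have hitems := PySem.Dict.items_foldl_insert_fresh L
      (fun kv => String.ofList kv.1) (fun kv => kv.2) PySem.Dict.empty
      (fun a _ => PySem.Dict.contains_empty _) hnodupL
  apply PySem.Dict.ext
  rw [hitems]
  rw [PySem.Dict.items_counter, pv_ofList_map' String.ofList pv_ofList_injective]
  simp only [hL, List.map_map]
  refine (List.nil_append _).trans ?_
  refine List.map_congr_left ?_
  intro k hk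
  have hk' : k ∈ pvK orders j := (PySem.Set.mem_ofList _ _).1 hk
  simp only [Function.comp]
  rw [List.count_map_of_injective _ _ pv_ofList_injective]

theorem pv_sorted_keys (d : PySem.Dict String Int) (hnd : d.keys.Nodup) (m : Int) :
    PySem.List.sorted
      (((d.items.filter (fun kv => kv.2 == m)).foldl
        (fun t kv => t.insert kv.1 kv.2) PySem.Dict.empty).keys)
      (fun x => ((d.items.filter (fun kv => kv.2 == m)).foldl
        (fun t kv => t.insert kv.1 kv.2) PySem.Dict.empty).getD x 0) true
    = (d.items.filter (fun kv => kv.2 == m)).map (fun kv => kv.1) := by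
  set F := d.items.filter (fun kv => kv.2 == m) with hF
  have hFsub : F.Sublist d.items := List.filter_sublist
  have hkeysF : (F.map (fun kv => kv.1)).Nodup := by
    have : (F.map (fun kv => kv.1)).Sublist (d.items.map (fun kv => kv.1)) :=
      hFsub.map _
    exact this.nodup hnd
  have hitems : ((F.foldl (fun t kv => t.insert kv.1 kv.2) PySem.Dict.empty).items) = F := by
    have := PySem.Dict.items_foldl_insert_fresh F (fun kv => kv.1) (fun kv => kv.2)
      PySem.Dict.empty (fun a _ => PySem.Dict.contains_empty _) hkeysF
    simpa using this
  set t2 := F.foldl (fun t kv => t.insert kv.1 kv.2) PySem.Dict.empty with ht2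
  have hkeys : t2.keys = F.map (fun kv => kv.1) := by
    show t2.items.map _ = _
    rw [hitems]
  have hval : ∀ x ∈ t2.keys, t2.getD x 0 = m := by
    intro x hx
    rw [hkeys] at hx
    rcases List.mem_map.1 hx with ⟨kv, hkv, hkvx⟩
    have hm : kv.2 = m := by
      have := (List.mem_filter.1 (hF ▸ hkv)).2
      simpa using this
    have hmem : (x, m) ∈ t2.items := by
      rw [hitems]
      have : kv = (x, m) := by
        rcases kv with ⟨k1, k2⟩
        simp only at hkvx hm
        rw [hkvx, hm]
      exact this ▸ hkv
    have hnd2 : t2.keys.Nodup := by rw [hkeys]; exact hkeysF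
    exact PySem.Dict.getD_of_mem_items t2 hmem hnd2 0
  rw [PySem.List.sorted_rev_eq_self_of_pairwise _ _ ?_, hkeys]
  exact List.pairwise_of_forall_mem_list
    (fun a ha b hb => by rw [hval a ha, hval b hb])

-- ---------- B-side: the DP computes pvWaysR, which counts occurrences in combinations ----------

theorem pv_waysR_nil_right (s : List Char) : pvWaysR s [] = 1 := by
  cases s <;> rfl

theorem pvWaysR_cons_cons (x : Char) (s : List Char) (y : Char) (t : List Char) :
    pvWaysR (x :: s) (y :: t) = pvWaysR s (y :: t) + (if x == y then pvWaysR s t else 0) := rfl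

theorem pv_getD_map_range (f : Nat → Int) (m i : Nat) (d : Int) :
    (((List.range m).map f).getD i d) = if i < m then f i else d := by
  by_cases h : i < m
  · rw [List.getD_eq_getElem?_getD, List.getElem?_map, List.getElem?_range h]
    simp [h]
  · rw [List.getD_eq_getElem?_getD, List.getElem?_map,
      List.getElem?_eq_none (by simpa using Nat.le_of_not_lt h)]
    simp [h]

theorem pv_dp (t : List Char) (s : List Char) :
    s.foldr (fun ch e =>
        ((List.range t.length).map (fun i =>
          e.getD i 0 + if t.getD i ' ' == ch then e.getD (i+1) 0 else 0)) ++ [1])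
      (List.replicate t.length 0 ++ [1])
    = (List.range (t.length+1)).map (fun i => pvWaysR s (t.drop i)) := by
  induction s with
  | nil =>
    rw [List.foldr_nil]
    conv_rhs => rw [List.range_succ, List.map_append]
    have h1 : (List.range t.length).map (fun i => pvWaysR [] (t.drop i))
        = List.replicate t.length 0 := by
      refine List.eq_replicate_iff.2 ⟨by simp, ?_⟩
      intro b hb
      rcases List.mem_map.1 hb with ⟨i, hi, hbi⟩
      have hil : i < t.length := List.mem_range.1 hi
      have hne : t.drop i ≠ [] := by
        intro h
        have := List.drop_eq_nil_iff.1 h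
        omega
      rcases List.exists_cons_of_ne_nil hne with ⟨y, u, hyu⟩
      rw [hyu] at hbi
      exact hbi ▸ rfl
    have h2 : (List.map (fun i => pvWaysR ([] : List Char) (t.drop i)) [t.length]) = [1] := by
      simp only [List.map_cons, List.map_nil, List.drop_length, pv_waysR_nil_right]
    rw [h1, h2]
  | cons x s ih =>
    rw [List.foldr_cons, ih]
    conv_rhs => rw [List.range_succ, List.map_append]
    congr 1
    · refine List.map_congr_left ?_
      intro i hi
      have hil : i < t.length := List.mem_range.1 hi
      have hEi : ((List.range (t.length+1)).map (fun i => pvWaysR s (t.drop i))).getD i 0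
          = pvWaysR s (t.drop i) := by
        rw [pv_getD_map_range]; exact if_pos (by omega)
      have hEi1 : ((List.range (t.length+1)).map (fun i => pvWaysR s (t.drop i))).getD (i+1) 0
          = pvWaysR s (t.drop (i+1)) := by
        rw [pv_getD_map_range]; exact if_pos (by omega)
      have htg : t.getD i ' ' = t[i] := List.getD_eq_getElem t ' ' hil
      have hdrop : t.drop i = t[i] :: t.drop (i+1) := by rw [List.getElem_cons_drop]
      rw [hEi, hEi1, htg, hdrop, pvWaysR_cons_cons, Bool.beq_comm (a := x) (b := t[i])]
    · simp only [List.map_cons, List.map_nil, List.drop_length, pv_waysR_nil_right]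

theorem pv_waysCore (s t : List Char) : waysCore s t = pvWaysR s t := by
  simp only [waysCore]
  rw [List.foldl_reverse, pv_dp t s, pv_getD_map_range]
  rw [if_pos (Nat.succ_pos _), List.drop_zero]

theorem pv_waysR_count (s : List Char) : ∀ (t : List Char),
    pvWaysR s t = ((PySem.List.combinations s t.length).count t : Int) := by
  induction s with
  | nil =>
    intro t
    cases t with
    | nil => simp [pv_waysR_nil_right, PySem.List.combinations_zero]
    | cons y t' =>
      show (0 : Int) = _
      simp [PySem.List.combinations_nil_succ]
  | cons x s ih =>
    intro t
    cases t with
    | nil => simp [pv_waysR_nil_right, PySem.List.combinations_zero]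
    | cons y t' =>
      have hsucc : (y :: t').length = t'.length + 1 := rfl
      rw [hsucc, PySem.List.combinations_cons_succ, List.count_append]
      have hmap : ((PySem.List.combinations s t'.length).map (fun c => x :: c)).count (y :: t')
          = if x = y then (PySem.List.combinations s t'.length).count t' else 0 := by
        by_cases hxy : x = y
        · subst hxy
          rw [if_pos rfl, List.count_map_of_injective _ _ (fun a b h => by injection h)]
        · rw [if_neg hxy, List.count_eq_zero]
          intro hmem
          rcases List.mem_map.1 hmem with ⟨c, _, hc⟩
          injection hc with h1 _
          exact hxy h1
      show pvWaysR s (y :: t') + (if x == y then pvWaysR s t' else 0) = _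
      rw [ih (y :: t'), ih t', hmap, hsucc]
      by_cases hxy : x = y
      · rw [if_pos (by exact beq_iff_eq.2 hxy), if_pos hxy]
        push_cast
        ring
      · rw [if_neg (by simp [hxy]), if_neg hxy]
        push_cast
        ring

theorem pv_count_flatMap {α β : Type} [BEq β] [LawfulBEq β]
    (l : List α) (f : α → List β) (a : β) :
    (l.flatMap f).count a = (l.map (fun x => (f x).count a)).sum := by
  induction l with
  | nil => rfl
  | cons x xs ih => simp [List.flatMap_cons, List.count_append, ih]

-- B's per-candidate sum of DP counts is the tally A's counter holds
theorem pv_sum_ways (orders : List String) (j : Int) (k : List Char)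
    (hk : k ∈ pvK orders j) :
    ((orders.map (fun o => String.ofList (pvSortedChars o))).map
      (fun o => ways o (String.ofList k))).sum
    = (((pvK orders j).map String.ofList).count (String.ofList k) : Int) := by
  have hlen : k.length = j.toNat := pv_len_mem_K orders j k hk
  have h1 : (orders.map (fun o => String.ofList (pvSortedChars o))).map
      (fun o => ways o (String.ofList k))
      = orders.map (fun o => ((PySem.List.combinations (pvSortedChars o) j.toNat).count k : Int)) := by
    rw [List.map_map]
    refine List.map_congr_left ?_
    intro o _
    simp only [Function.comp_apply, ways, String.toList_ofList]
    rw [pv_waysCore, pv_waysR_count, hlen]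
  rw [h1, List.count_map_of_injective _ _ pv_ofList_injective]
  rw [pvK, pv_count_flatMap, Nat.cast_list_sum, List.map_map]
  rfl

theorem pv_zip_map {α β : Type} (g : α → β) (l : List α) :
    l.zip (l.map g) = l.map (fun x => (x, g x)) := by
  induction l with
  | nil => rfl
  | cons x xs ih => simp [ih]

-- ===== VERDICT (by name: the statement is the Claim_ definition above) =====
theorem solution_spec : Claim_equal_solution := by
  intro orders course hdom hpre
  obtain ⟨hnd, hpos⟩ := hpre
  unfold Spec_solution
  simp only [solution, solution_alt]
  have hc := pv_combdict orders course
  simp only [pvSortedChars] at hc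
  rw [hc]
  refine congrArg (fun l => PySem.List.sorted l (fun x => x) false) ?_
  refine PySem.List.foldl_congr_mem _ _ _ _ ?_
  intro answer j hj
  have htemp := pv_temp_eq_cnt orders course j hnd hpos hj
  rw [htemp]
  have hflat : (orders.map (fun o => String.ofList (PySem.List.sorted o.toList (fun c => c) false))).flatMap
      (fun o => (PySem.List.combinations o.toList j.toNat).map (fun c => String.ofList c))
      = (pvK orders j).map String.ofList := by
    simp [pvK, pvSortedChars, List.map_flatMap, List.flatMap_map,
      String.toList_ofList]
  rw [PySem.List.dedup_eq_ofList, hflat]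
  have hcnt : ∀ s ∈ PySem.Set.ofList ((pvK orders j).map String.ofList),
      ((orders.map (fun o => String.ofList (PySem.List.sorted o.toList (fun c => c) false))).map
        (fun o => ways o s)).sum
      = (((pvK orders j).map String.ofList).count s : Int) := by
    intro s hs
    have hsL : s ∈ (pvK orders j).map String.ofList := (PySem.Set.mem_ofList _ _).1 hs
    rcases List.mem_map.1 hsL with ⟨k, hk, rfl⟩
    have := pv_sum_ways orders j k hk
    simpa [pvSortedChars] using this
  have hcounts : (PySem.Set.ofList ((pvK orders j).map String.ofList)).map
      (fun s => ((orders.map (fun o => String.ofList (PySem.List.sorted o.toList (fun c => c) false))).map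
        (fun o => ways o s)).sum)
      = (PySem.Set.ofList ((pvK orders j).map String.ofList)).map
        (fun s => (((pvK orders j).map String.ofList).count s : Int)) :=
    List.map_congr_left hcnt
  rw [hcounts, pv_zip_map]
  have hvals : (PySem.Dict.counter ((pvK orders j).map String.ofList)).values
      = (PySem.Set.ofList ((pvK orders j).map String.ofList)).map
        (fun s => (((pvK orders j).map String.ofList).count s : Int)) := by
    simp only [PySem.Dict.values, PySem.Dict.items_counter, List.map_map]
    rfl
  have hsize : (PySem.Dict.counter ((pvK orders j).map String.ofList)).size
      = (PySem.Set.ofList ((pvK orders j).map String.ofList)).length := by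
    simp only [PySem.Dict.size, PySem.Dict.items_counter, List.length_map]
  rw [hvals, hsize]
  by_cases hnil : PySem.Set.ofList ((pvK orders j).map String.ofList) = []
  · rw [hnil]
    simp
  · have hsz : (PySem.Set.ofList ((pvK orders j).map String.ofList)).length ≠ 0 := by
      simpa [List.length_eq_zero_iff] using hnil
    rw [if_pos hsz, if_pos hnil]
    cases hmax : PySem.List.max? ((PySem.Set.ofList ((pvK orders j).map String.ofList)).map
        (fun s => (((pvK orders j).map String.ofList).count s : Int))) (fun v => v) with
    | none => rfl
    | some best =>
      dsimp only
      by_cases hbest : best > 1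
      · rw [if_pos hbest, if_pos hbest]
        have hsorted := pv_sorted_keys (PySem.Dict.counter ((pvK orders j).map String.ofList))
          (PySem.Dict.nodup_keys_counter _) best
        rw [hsorted, PySem.Dict.items_counter, List.filter_map, List.map_map]
      · rw [if_neg hbest, if_neg hbest]
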